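-- pv_equiv track=rewrite | github.com/BBroomell1/Codes | SchoolWork/COP4020/secondAssignment.py | base_builder
-- ===== SOURCE A (Python) =====
-- def base_builder(n):
--     sumValue = 0
--     quatValue = ""
--     def baseConversion(n):
--         if n <= 0:
--             return ""
--         if (n / 4) <= 0:
--             return str(n % 4)
--         else:
--             return baseConversion(int(n / 4)) + str(int(n % 4))
--
--     quatValue = baseConversion(n)
--     for char in quatValue:
--         sumValue += int(char)
--
--     answer = sumValue, int(quatValue)
--     return answer
-- ===== SOURCE B (Python) =====
-- def base_builder(n):
--     # Iterative LSB-first digit loop instead of the recursive MSB-first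
--     # string-concatenating helper; digit sum computed numerically.
--     m = n
--     digits = []
--     while m > 0:
--         digits.append(m % 4)
--         m //= 4
--     quatValue = ''.join(str(d) for d in reversed(digits))
--     return sum(digits), int(quatValue)
-- ===== Notes on version B (the rewrite author's own statement) =====
-- stated objective: simpler
-- what changed: Replaces the recursive MSB-first string-concatenating helper (then a char loop re-parsing each digit with int()) by one iterative LSB-first loop over integer digits, summing them numerically and joining the base-4 string once at the end.
import Mathlib
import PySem

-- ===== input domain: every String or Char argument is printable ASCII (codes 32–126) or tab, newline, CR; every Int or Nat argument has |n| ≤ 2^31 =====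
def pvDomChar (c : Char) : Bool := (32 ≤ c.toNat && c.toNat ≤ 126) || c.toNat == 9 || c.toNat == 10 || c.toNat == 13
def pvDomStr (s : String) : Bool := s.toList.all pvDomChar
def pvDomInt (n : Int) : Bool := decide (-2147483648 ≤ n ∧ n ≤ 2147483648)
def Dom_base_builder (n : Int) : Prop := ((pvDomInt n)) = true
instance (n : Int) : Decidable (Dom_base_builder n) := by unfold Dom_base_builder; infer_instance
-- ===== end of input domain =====

-- B replaces A's recursive MSB-first string-building helper by an iterative LSB-first
-- digit loop (numeric digit sum, string joined once); return values proved equal on n > 0.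

-- ===== PORT A =====
-- recursive helper baseConversion: builds the base-4 digit string MSB-first.
-- Python's test `(n / 4) <= 0` is float division; for |n| ≤ 2^31 it is exact, so
-- `n / 4 <= 0` holds iff n ≤ 0 (ported as `n ≤ 0`); `int(n / 4)` is PySem.Int.truncdiv.
def pvBaseConversion (n : Int) : List Char :=
  if _h : n ≤ 0 then []
  else if n ≤ 0 then PySem.Int.toChars (PySem.Int.mod n 4)
  else pvBaseConversion (PySem.Int.truncdiv n 4) ++ PySem.Int.toChars (PySem.Int.mod n 4)
termination_by n.toNat
decreasing_by
  have h4 : PySem.Int.truncdiv n 4 = n / 4 := by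
    simp [PySem.Int.truncdiv]; rw [Int.tdiv_eq_ediv_of_nonneg (by omega)]
  simp [h4]; omega

-- int(char) for each char of the digit string, then int(quatValue); the latter raises
-- ValueError (= none) exactly when quatValue = "" i.e. n ≤ 0, excluded by Pre_.
def base_builder (n : Int) : Int × Int :=
  let quatValue := pvBaseConversion n
  let sumValue := quatValue.foldl (fun acc c => acc + (PySem.Int.ofChars? [c]).getD 0) 0
  (sumValue, (PySem.Int.ofChars? quatValue).getD 0)

-- ===== PORT B =====
-- while m > 0: digits.append(m % 4); m //= 4
def pvCollectDigits (m : Int) (digits : List Int) : List Int :=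
  if _h : m ≤ 0 then digits
  else pvCollectDigits (PySem.Int.floordiv m 4) (digits ++ [PySem.Int.mod m 4])
termination_by m.toNat
decreasing_by
  have h4 : PySem.Int.floordiv m 4 = m / 4 := by
    simp [PySem.Int.floordiv]; rw [Int.fdiv_eq_ediv]; simp
  simp only [h4]; omega

-- ''.join(str(d) for d in reversed(digits)); sum(digits); int(quatValue)
def base_builder_alt (n : Int) : Int × Int :=
  let digits := pvCollectDigits n []
  let quatValue := (digits.reverse.map PySem.Int.toChars).flatten
  (digits.sum, (PySem.Int.ofChars? quatValue).getD 0)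

-- ===== PRECONDITION & SPEC =====
-- Pre_ excludes exactly n ≤ 0, where the digit string is empty and Python A raises
-- ValueError at int("") (B raises there too).
def Pre_base_builder (n : Int) : Prop := 0 < n
instance (n : Int) : Decidable (Pre_base_builder n) := by unfold Pre_base_builder; infer_instance
def pvWitness_base_builder : Int := (29)

def Spec_base_builder (n : Int) (out : Int × Int) : Prop := out = base_builder_alt n
instance (n : Int) (out : Int × Int) : Decidable (Spec_base_builder n out) := by unfold Spec_base_builder; infer_instance

-- ===== CLAIM (what is proved, stated in full; the proofs are below) =====
def Claim_equal_base_builder : Prop := ∀ (n : Int), Dom_base_builder n → Pre_base_builder n → Spec_base_builder n (base_builder n)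

-- ===== LEMMAS AND PROOFS =====

-- int(n/4) = n//4 for 0 ≤ n
lemma pv_truncdiv_eq_floordiv (n : Int) (h : 0 ≤ n) :
    PySem.Int.truncdiv n 4 = PySem.Int.floordiv n 4 := by
  simp [PySem.Int.truncdiv, PySem.Int.floordiv]
  rw [Int.tdiv_eq_ediv_of_nonneg h, Int.fdiv_eq_ediv]
  simp

lemma pv_floordiv4_lt (m : Int) (h : 0 < m) :
    (PySem.Int.floordiv m 4).toNat < m.toNat := by
  have h4 : PySem.Int.floordiv m 4 = m / 4 := by
    simp [PySem.Int.floordiv]; rw [Int.fdiv_eq_ediv]; simp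
  simp only [h4]; omega

-- B's loop returns its accumulator unchanged once m ≤ 0
lemma pvCollectDigits_nonpos (m : Int) (h : m ≤ 0) (ds : List Int) :
    pvCollectDigits m ds = ds := by
  rw [pvCollectDigits]; simp [h]

-- one step of B's loop for m > 0
lemma pvCollectDigits_step (m : Int) (h : 0 < m) (ds : List Int) :
    pvCollectDigits m ds = pvCollectDigits (PySem.Int.floordiv m 4) (ds ++ [PySem.Int.mod m 4]) := by
  rw [pvCollectDigits]
  have h' : ¬ m ≤ 0 := by omega
  simp [h']

-- the accumulator of B's loop is a pure prefix (fuel-indexed strong induction)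
lemma pvCollectDigits_acc_aux (k : Nat) :
    ∀ (m : Int), m.toNat ≤ k → ∀ ds, pvCollectDigits m ds = ds ++ pvCollectDigits m [] := by
  induction k with
  | zero =>
    intro m hm ds
    have h : m ≤ 0 := by omega
    rw [pvCollectDigits_nonpos m h, pvCollectDigits_nonpos m h]
    simp
  | succ k ih =>
    intro m hm ds
    by_cases h : m ≤ 0
    · rw [pvCollectDigits_nonpos m h, pvCollectDigits_nonpos m h]; simp
    · have hlt : (PySem.Int.floordiv m 4).toNat ≤ k := by
        have := pv_floordiv4_lt m (by omega)
        omega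
      rw [pvCollectDigits_step m (by omega), pvCollectDigits_step m (by omega) []]
      rw [ih _ hlt (ds ++ [PySem.Int.mod m 4]), ih _ hlt ([] ++ [PySem.Int.mod m 4])]
      simp

lemma pvCollectDigits_acc (m : Int) (ds : List Int) :
    pvCollectDigits m ds = ds ++ pvCollectDigits m [] :=
  pvCollectDigits_acc_aux m.toNat m (le_refl _) ds

-- B's digit list, LSB first, unfolded one step for m > 0
lemma pvCollectDigits_pos (m : Int) (h : 0 < m) :
    pvCollectDigits m [] = PySem.Int.mod m 4 :: pvCollectDigits (PySem.Int.floordiv m 4) [] := by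
  rw [pvCollectDigits_step m h, pvCollectDigits_acc]
  simp

-- every digit produced by B's loop is in [0, 4)
lemma pvCollectDigits_mem_aux (k : Nat) :
    ∀ (m : Int), m.toNat ≤ k → ∀ d ∈ pvCollectDigits m [], 0 ≤ d ∧ d < 4 := by
  induction k with
  | zero =>
    intro m hm d hd
    have h : m ≤ 0 := by omega
    rw [pvCollectDigits_nonpos m h] at hd
    simp at hd
  | succ k ih =>
    intro m hm d hd
    by_cases h : m ≤ 0
    · rw [pvCollectDigits_nonpos m h] at hd; simp at hd
    · rw [pvCollectDigits_pos m (by omega)] at hd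
      rcases List.mem_cons.mp hd with h1 | h2
      · subst h1
        exact ⟨PySem.Int.mod_nonneg _ (by norm_num), PySem.Int.mod_lt _ (by norm_num)⟩
      · have hlt : (PySem.Int.floordiv m 4).toNat ≤ k := by
          have := pv_floordiv4_lt m (by omega)
          omega
        exact ih _ hlt d h2

lemma pvCollectDigits_mem (m : Int) (d : Int) (hd : d ∈ pvCollectDigits m []) :
    0 ≤ d ∧ d < 4 :=
  pvCollectDigits_mem_aux m.toNat m (le_refl _) d hd

-- the two digit strings coincide: A's recursion = B's reversed, joined digit list
lemma pv_quat_eq_aux (k : Nat) :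
    ∀ (n : Int), n.toNat ≤ k →
      pvBaseConversion n = ((pvCollectDigits n []).reverse.map PySem.Int.toChars).flatten := by
  induction k with
  | zero =>
    intro n hn
    have h : n ≤ 0 := by omega
    rw [pvBaseConversion, pvCollectDigits_nonpos n h]
    simp [h]
  | succ k ih =>
    intro n hn
    by_cases h : n ≤ 0
    · rw [pvBaseConversion, pvCollectDigits_nonpos n h]; simp [h]
    · rw [pvBaseConversion]
      simp only [h, dite_false]
      rw [pv_truncdiv_eq_floordiv n (by omega)]
      have hlt : (PySem.Int.floordiv n 4).toNat ≤ k := by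
        have := pv_floordiv4_lt n (by omega)
        omega
      rw [ih _ hlt, pvCollectDigits_pos n (by omega)]
      simp

lemma pv_quat_eq (n : Int) :
    pvBaseConversion n = ((pvCollectDigits n []).reverse.map PySem.Int.toChars).flatten :=
  pv_quat_eq_aux n.toNat n (le_refl _)

-- str(d) re-parsed with int() gives back d, for a base-4 digit d
lemma pv_digit_char (d : Int) (h0 : 0 ≤ d) (h4 : d < 4) :
    (PySem.Int.toChars d).map (fun c => (PySem.Int.ofChars? [c]).getD 0) = [d] := by
  interval_cases d <;> decide

-- A's per-character sum over the digit string equals B's numeric digit sum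
lemma pv_sum_eq (n : Int) :
    (pvBaseConversion n).foldl (fun acc c => acc + (PySem.Int.ofChars? [c]).getD 0) 0
      = (pvCollectDigits n []).sum := by
  rw [pv_quat_eq, PySem.List.foldl_add]
  rw [List.map_flatten, List.map_map]
  have hmap : ((pvCollectDigits n []).reverse.map
      (List.map (fun c => (PySem.Int.ofChars? [c]).getD 0) ∘ PySem.Int.toChars))
      = (pvCollectDigits n []).reverse.map (fun d => [d]) := by
    apply List.map_congr_left
    intro d hd
    have hb := pvCollectDigits_mem n d (List.mem_reverse.mp hd)
    exact pv_digit_char d hb.1 hb.2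
  rw [hmap]
  simp [List.sum_reverse, Function.comp_def]

-- ===== VERDICT (by name: the statement is the Claim_ definition above) =====
theorem base_builder_spec : Claim_equal_base_builder := by
  intro n _ _
  unfold Spec_base_builder base_builder base_builder_alt
  simp only
  rw [pv_sum_eq, pv_quat_eq]
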